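-- pv_equiv track=rewrite | github.com/prishni/debug-louvain | louvain_mixmod_m21_wt.py | __renumber
-- ===== SOURCE A (Python) =====
-- def __renumber(dictionary) :
--     count = 1
--     #count = 0
--     ret = dictionary.copy()
--     new_values = dict([])
--
--     for key in dictionary.keys() :
--         value = dictionary[key]
--         new_value = new_values.get(value, -1)
--         if new_value == -1 :
--             new_values[value] = count
--             new_value = count
--             count = count + 1
--         ret[key] = new_value
--
--     return ret
-- ===== SOURCE B (Python) =====
-- def __renumber(dictionary):
--     # label of a value = number of distinct values up to (and including) its first occurrence:
--     # one forward pass builds prefix distinct counts with a set, one backward pass records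
--     # first-occurrence positions, then the labels are read off arithmetically.
--     values = list(dictionary.values())
--     seen = set()
--     distinct_upto = []
--     for v in values:
--         seen.add(v)
--         distinct_upto.append(len(seen))
--     first_pos = {}
--     for i in range(len(values) - 1, -1, -1):
--         first_pos[values[i]] = i
--     return {key: distinct_upto[first_pos[value]] for key, value in dictionary.items()}
-- ===== Notes on version B (the rewrite author's own statement) =====
-- stated objective: alternative
-- what changed: A's single fused loop maintaining a running counter and a value-to-label table and rewriting the copied dict in place is replaced by an arithmetic scheme: a forward pass computes prefix distinct counts with a set, a backward pass records each value's first-occurrence index by unconditional overwrite, and each label is read off as the distinct count at the value's first occurrence; no counter and no conditional label assignment remain.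
import Mathlib
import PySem

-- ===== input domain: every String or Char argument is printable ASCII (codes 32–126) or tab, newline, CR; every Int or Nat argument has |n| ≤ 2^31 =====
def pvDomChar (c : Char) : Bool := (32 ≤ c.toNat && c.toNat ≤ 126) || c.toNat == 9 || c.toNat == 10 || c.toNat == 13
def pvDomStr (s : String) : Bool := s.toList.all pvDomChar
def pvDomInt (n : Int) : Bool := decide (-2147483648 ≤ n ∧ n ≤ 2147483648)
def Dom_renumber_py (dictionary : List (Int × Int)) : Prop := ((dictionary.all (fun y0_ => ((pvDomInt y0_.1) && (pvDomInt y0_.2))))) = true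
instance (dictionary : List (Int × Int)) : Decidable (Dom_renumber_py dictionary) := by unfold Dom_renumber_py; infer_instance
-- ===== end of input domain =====

-- B replaces the counter-and-label-table loop by arithmetic: prefix distinct counts plus a
-- backward first-occurrence scan; the label of a value is the distinct count at its first occurrence.

-- ===== PORT A =====
-- fused single loop: ret starts as a copy of the dict and is updated in place while numbering
def renumber_py (dictionary : List (Int × Int)) : List (Int × Int) :=
  let d : PySem.Dict Int Int := PySem.Dict.mk dictionary
  -- state = (count, new_values, ret)
  let fin := d.keys.foldl
    (fun (st : Int × PySem.Dict Int Int × PySem.Dict Int Int) key =>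
      let value := d.getD key 0          -- dictionary[key]; key ∈ keys so always present
      let new_value := st.2.1.getD value (-1)
      if new_value == -1 then
        (st.1 + 1, st.2.1.insert value st.1, st.2.2.insert key st.1)
      else
        (st.1, st.2.1, st.2.2.insert key new_value))
    (1, PySem.Dict.empty, d)
  fin.2.2.items

-- ===== PORT B =====
def renumber_py_alt (dictionary : List (Int × Int)) : List (Int × Int) :=
  let values := dictionary.map Prod.snd
  -- forward pass: seen-set + list of prefix distinct counts
  let distinct_upto := (values.foldl
    (fun (st : PySem.Set Int × List Int) v =>
      let s := PySem.Set.add st.1 v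
      (s, st.2 ++ [((s.length : Int))]))
    ((PySem.Set.ofList []), [])).2
  -- backward pass: first_pos[values[i]] = i (later, smaller i overwrites)
  let first_pos := (PySem.List.pyRange ((values.length : Int) - 1) (-1) (-1)).foldl
    (fun (d : PySem.Dict Int Int) i => d.insert (PySem.List.pyGetD values i 0) i)
    PySem.Dict.empty
  -- first_pos[value] is always present and distinct_upto[first_pos[value]] always in range
  dictionary.map (fun p => (p.1, PySem.List.pyGetD distinct_upto (first_pos.getD p.2 0) 0))

-- ===== PRECONDITION & SPEC =====
-- Pre_ only says the association list really encodes a Python dict: duplicate keys cannot occur in A's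
-- dict argument, so lists with duplicate keys are artefacts of the encoding, not inputs A accepts.
def Pre_renumber_py (dictionary : List (Int × Int)) : Prop :=
  (dictionary.map Prod.fst).Nodup
instance (dictionary : List (Int × Int)) : Decidable (Pre_renumber_py dictionary) := by unfold Pre_renumber_py; infer_instance

def pvWitness_renumber_py : (List (Int × Int)) := [(0, 5), (1, 5), (2, 7), (3, 5)]

def Spec_renumber_py (dictionary : List (Int × Int)) (out : List (Int × Int)) : Prop := out = renumber_py_alt dictionary
instance (dictionary : List (Int × Int)) (out : List (Int × Int)) : Decidable (Spec_renumber_py dictionary out) := by unfold Spec_renumber_py; infer_instance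

-- ===== CLAIM (what is proved, stated in full; the proofs are below) =====
def Claim_equal_renumber_py : Prop := ∀ (dictionary : List (Int × Int)), Dom_renumber_py dictionary → Pre_renumber_py dictionary → Spec_renumber_py dictionary (renumber_py dictionary)

-- ===== LEMMAS AND PROOFS =====

-- A's loop body, rephrased over (key, value) pairs (value = the dict lookup of the key)
def stepA (st : Int × PySem.Dict Int Int × PySem.Dict Int Int) (p : Int × Int) :
    Int × PySem.Dict Int Int × PySem.Dict Int Int :=
  let new_value := st.2.1.getD p.2 (-1)
  if new_value == -1 then
    (st.1 + 1, st.2.1.insert p.2 st.1, st.2.2.insert p.1 st.1)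
  else
    (st.1, st.2.1, st.2.2.insert p.1 new_value)

-- A's label table, as a fold over the values alone
def stepB (s : PySem.Dict Int Int) (v : Int) : PySem.Dict Int Int :=
  if s.contains v then s else s.insert v ((s.size : Int) + 1)

-- the relabelled item list produced while folding stepB from table s
def relabel (s : PySem.Dict Int Int) : List (Int × Int) → List (Int × Int)
  | [] => []
  | p :: t =>
    if s.contains p.2 then (p.1, s.getD p.2 0) :: relabel s t
    else (p.1, (s.size : Int) + 1) :: relabel (s.insert p.2 ((s.size : Int) + 1)) t

lemma stepB_getD_preserved (t : List Int) (s : PySem.Dict Int Int) (v : Int)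
    (hv : s.contains v = true) :
    (t.foldl stepB s).getD v 0 = s.getD v 0 ∧ (t.foldl stepB s).contains v = true := by
  induction t generalizing s with
  | nil => exact ⟨rfl, hv⟩
  | cons w t ih =>
    simp only [List.foldl_cons, stepB]
    by_cases h : s.contains w = true
    · simp only [h, if_true]; exact ih s hv
    · simp only [h, Bool.false_eq_true, if_false]
      have hne : v ≠ w := by intro e; rw [e] at hv; exact absurd hv (by simp [h])
      refine (ih _ ?_).imp (fun h2 => by rw [h2, PySem.Dict.getD_insert_of_ne _ _ _ hne]) id
      simp [PySem.Dict.contains_insert, hv]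

-- relabel s t is the final table's lookup mapped over t
lemma relabel_eq_map (t : List (Int × Int)) (s : PySem.Dict Int Int) :
    relabel s t = t.map (fun p => (p.1, ((t.map Prod.snd).foldl stepB s).getD p.2 0)) := by
  induction t generalizing s with
  | nil => rfl
  | cons p t ih =>
    simp only [relabel, List.map_cons, List.foldl_cons, stepB]
    by_cases h : s.contains p.2 = true
    · simp only [h, if_true]
      rw [ih s, (stepB_getD_preserved (t.map Prod.snd) s p.2 h).1]
    · simp only [h, Bool.false_eq_true, if_false]
      rw [ih]
      congr 1
      have hc : (s.insert p.2 ((s.size : Int) + 1)).contains p.2 = true := by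
        simp
      have := stepB_getD_preserved (t.map Prod.snd) _ p.2 hc
      rw [this.1, PySem.Dict.getD_insert_self]

-- table values stay ≥ 1 (so the -1 sentinel never collides)
lemma stepA_count_pos (s : PySem.Dict Int Int) (v w : Int)
    (hvals : ∀ u ∈ s.values, 1 ≤ u) (h : s.getD v (-1) = w) (hc : s.contains v = true) :
    1 ≤ w := by
  rw [PySem.Dict.getD_eq_get?_getD] at h
  rcases ho : s.get? v with _ | u
  · rw [PySem.Dict.contains_eq_isSome_get?, ho] at hc; simp at hc
  · have := PySem.Dict.mem_items_of_get?_eq_some s ho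
    have hu : u ∈ s.values := by
      simp only [PySem.Dict.values]; exact List.mem_map.2 ⟨(v, u), this, rfl⟩
    rw [ho] at h; simp at h; subst h; exact hvals u hu

-- overwrite of the head key of the pending suffix rewrites exactly that entry
lemma mk_insert_head (done t : List (Int × Int)) (p : Int × Int) (w : Int)
    (hnd : ((done ++ p :: t).map Prod.fst).Nodup) :
    (PySem.Dict.mk (done ++ p :: t)).insert p.1 w = PySem.Dict.mk (done ++ (p.1, w) :: t) := by
  have hc : (PySem.Dict.mk (done ++ p :: t)).contains p.1 = true := by
    rw [PySem.Dict.contains_iff_mem_keys]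
    show p.1 ∈ List.map Prod.fst (done ++ p :: t)
    simp
  apply PySem.Dict.ext
  rw [PySem.Dict.items_insert_of_contains _ _ hc]
  have hdone : ∀ q ∈ done, q.1 ≠ p.1 := by
    intro q hq he
    simp only [List.map_append, List.map_cons, List.nodup_append] at hnd
    exact hnd.2.2 q.1 (List.mem_map.2 ⟨q, hq, rfl⟩) p.1 List.mem_cons_self he
  have ht : ∀ q ∈ t, q.1 ≠ p.1 := by
    intro q hq he
    simp only [List.map_append, List.map_cons] at hnd
    have := (List.nodup_append.1 hnd).2.1
    rw [List.nodup_cons] at this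
    exact this.1 (by rw [← he]; exact List.mem_map.2 ⟨q, hq, rfl⟩)
  show List.map _ (done ++ p :: t) = _
  rw [List.map_append, List.map_cons]
  congr 1
  · calc List.map _ done = List.map id done := by
          apply List.map_congr_left; intro q hq
          simp [beq_iff_eq, hdone q hq]
      _ = done := List.map_id done
  · congr 1
    · simp
    · calc List.map _ t = List.map id t := by
            apply List.map_congr_left; intro q hq
            simp [beq_iff_eq, ht q hq]
        _ = t := List.map_id t

-- main loop invariant: A's fused fold = the value-table fold + relabel, key by key
lemma loop_inv (t done : List (Int × Int)) (s : PySem.Dict Int Int)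
    (hvals : ∀ u ∈ s.values, 1 ≤ u)
    (hnd : ((done ++ t).map Prod.fst).Nodup) :
    t.foldl stepA (((s.size : Int)) + 1, s, PySem.Dict.mk (done ++ t)) =
      ((((t.map Prod.snd).foldl stepB s).size : Int) + 1, (t.map Prod.snd).foldl stepB s,
        PySem.Dict.mk (done ++ relabel s t)) := by
  induction t generalizing done s with
  | nil => rfl
  | cons p t ih =>
    simp only [List.foldl_cons, List.map_cons, stepA, stepB, relabel]
    by_cases h : s.contains p.2 = true
    · have hne : ¬ (s.getD p.2 (-1) == -1) = true := by
        simp only [beq_iff_eq]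
        intro he
        have := stepA_count_pos s p.2 _ hvals he h
        omega
      simp only [hne, Bool.false_eq_true, if_false, h, if_true]
      have : (PySem.Dict.mk (done ++ p :: t)).insert p.1 (s.getD p.2 (-1)) =
          PySem.Dict.mk ((done ++ [(p.1, s.getD p.2 0)]) ++ t) := by
        rw [mk_insert_head done t p _ hnd]
        have : s.getD p.2 (-1) = s.getD p.2 0 := by
          rw [PySem.Dict.getD_eq_get?_getD, PySem.Dict.getD_eq_get?_getD]
          rcases ho : s.get? p.2 with _ | u
          · rw [PySem.Dict.contains_eq_isSome_get?, ho] at h; simp at h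
          · rfl
        rw [this]; simp
      rw [this, ih (done ++ [(p.1, s.getD p.2 0)]) s hvals (by simpa using hnd)]
      simp
    · have heq : (s.getD p.2 (-1) == -1) = true := by
        simp [PySem.Dict.getD_of_not_contains s (-1) (by simpa using h)]
      simp only [heq, if_true, h, Bool.false_eq_true, if_false]
      have hsz : (s.insert p.2 ((s.size : Int) + 1)).size = s.size + 1 := by
        rw [PySem.Dict.size_insert]; simp [h]
      have hv' : ∀ u ∈ (s.insert p.2 ((s.size : Int) + 1)).values, 1 ≤ u := by
        intro u hu
        rcases PySem.Dict.mem_values_insert _ _ _ _ hu with h1 | h1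
        · subst h1; omega
        · exact hvals u h1
      have hmk : (PySem.Dict.mk (done ++ p :: t)).insert p.1 ((s.size : Int) + 1) =
          PySem.Dict.mk ((done ++ [(p.1, (s.size : Int) + 1)]) ++ t) := by
        rw [mk_insert_head done t p _ hnd]; simp
      rw [hmk]
      have := ih (done ++ [(p.1, (s.size : Int) + 1)]) (s.insert p.2 ((s.size : Int) + 1))
        hv' (by simpa using hnd)
      rw [hsz] at this
      push_cast at this ⊢
      rw [this]
      simp

-- A computed pointwise: each key is sent to the final label table's lookup of its value
lemma A_char (l : List (Int × Int)) (hpre : (l.map Prod.fst).Nodup) :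
    renumber_py l =
      l.map (fun p => (p.1, ((l.map Prod.snd).foldl stepB PySem.Dict.empty).getD p.2 0)) := by
  simp only [renumber_py]
  have hkeys : (PySem.Dict.mk l).keys = l.map Prod.fst := rfl
  have hnd : (PySem.Dict.mk l).keys.Nodup := by rw [hkeys]; exact hpre
  have hitems := PySem.Dict.items_eq_map_keys (PySem.Dict.mk l) hnd 0
  have hfold : ∀ (init : Int × PySem.Dict Int Int × PySem.Dict Int Int),
      (PySem.Dict.mk l).keys.foldl
        (fun st key =>
          let value := (PySem.Dict.mk l).getD key 0
          let new_value := st.2.1.getD value (-1)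
          if new_value == -1 then
            (st.1 + 1, st.2.1.insert value st.1, st.2.2.insert key st.1)
          else
            (st.1, st.2.1, st.2.2.insert key new_value)) init
      = ((PySem.Dict.mk l).items).foldl stepA init := by
    intro init
    rw [hitems, List.foldl_map]
    rfl
  rw [hfold]
  have hitems' : (PySem.Dict.mk l).items = l := rfl
  rw [hitems']
  have hmain := loop_inv l [] PySem.Dict.empty (by intro u hu; exact absurd hu List.not_mem_nil) (by simpa using hpre)
  simp only [PySem.Dict.size_empty, Nat.cast_zero, zero_add, List.nil_append] at hmain
  rw [hmain]
  show relabel PySem.Dict.empty l = _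
  rw [relabel_eq_map]

-- the label table fold, characterised: size = # distinct so far, lookup = 1 + rank in first-appearance order
lemma table_char (vs : List Int) :
    ((vs.foldl stepB PySem.Dict.empty).size = (PySem.Set.ofList vs).length) ∧
    (∀ v : Int, (vs.foldl stepB PySem.Dict.empty).get? v =
      if v ∈ vs then some (((PySem.Set.ofList vs).idxOf v : Int) + 1) else none) := by
  induction vs using List.reverseRecOn with
  | nil => exact ⟨rfl, fun v => by simp [PySem.Dict.get?_empty]⟩
  | append_singleton t w ih =>
    rw [List.foldl_append, List.foldl_cons, List.foldl_nil, PySem.Set.ofList_append_singleton]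
    set T := t.foldl stepB PySem.Dict.empty with hT
    have hcont : ∀ v, T.contains v = true ↔ v ∈ t := by
      intro v
      rw [PySem.Dict.contains_eq_isSome_get?, (ih.2 v)]
      by_cases hv : v ∈ t <;> simp [hv]
    by_cases hw : w ∈ t
    · have hcw : T.contains w = true := (hcont w).2 hw
      rw [stepB, if_pos hcw, PySem.Set.add_of_mem (by simp [PySem.Set.mem_ofList, hw])]
      refine ⟨ih.1, fun v => ?_⟩
      rw [ih.2 v]
      by_cases hv : v ∈ t <;> simp [hv]
      intro hvw; subst hvw; exact absurd hw hv
    · have hcw : T.contains w = false := by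
        rcases h : T.contains w with _ | _
        · rfl
        · exact absurd ((hcont w).1 h) hw
      have hwD : w ∉ PySem.Set.ofList t := by simp [PySem.Set.mem_ofList, hw]
      rw [stepB, hcw, PySem.Set.add_of_not_mem hwD]
      simp only [Bool.false_eq_true, if_false]
      constructor
      · rw [PySem.Dict.size_insert, hcw]
        simp [ih.1]
      · intro v
        by_cases hvw : v = w
        · subst hvw
          rw [PySem.Dict.get?_insert_self]
          have : (PySem.Set.ofList t ++ [v]).idxOf v = (PySem.Set.ofList t).length := by
            rw [List.idxOf_append_of_notMem hwD]; simp
          simp [this, ih.1]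
        · rw [PySem.Dict.get?_insert_of_ne _ _ hvw, ih.2 v]
          by_cases hv : v ∈ t
          · rw [List.idxOf_append_of_mem (by simp [PySem.Set.mem_ofList, hv])]
            simp [hv, List.mem_append, hvw]
          · simp [hv, hvw]

-- the forward fold's second component is the list of prefix distinct counts
lemma du_aux (t : List Int) (S : PySem.Set Int) (acc : List Int) :
    (t.foldl (fun (st : PySem.Set Int × List Int) v =>
        let s := PySem.Set.add st.1 v
        (s, st.2 ++ [((s.length : Int))])) (S, acc)).2 =
      acc ++ (List.range t.length).map
        (fun j => ((PySem.Set.update S (t.take (j + 1))).length : Int)) := by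
  induction t generalizing S acc with
  | nil => simp
  | cons v t ih =>
    simp only [List.foldl_cons, List.length_cons]
    rw [ih, List.range_succ_eq_map]
    simp only [List.map_cons, List.map_map, List.append_assoc, List.singleton_append]
    refine congrArg (acc ++ ·) ?_
    refine List.cons_eq_cons.mpr ⟨?_, ?_⟩
    · simp [PySem.Set.update_cons, PySem.Set.update_nil]
    · apply List.map_congr_left
      intro j _
      simp [Function.comp, List.take_succ_cons, PySem.Set.update_cons]

-- the backward fold's lookup is the first-occurrence index
lemma fp_aux (vs : List Int) (m : Nat) (hm : m ≤ vs.length) (d : PySem.Dict Int Int) (v : Int) :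
    ((PySem.List.pyRange ((m : Int) - 1) (-1) (-1)).foldl
        (fun (d : PySem.Dict Int Int) i => d.insert (PySem.List.pyGetD vs i 0) i) d).get? v =
      if v ∈ vs.take m then some (((vs.take m).idxOf v : Int)) else d.get? v := by
  induction m generalizing d with
  | zero =>
    rw [PySem.List.pyRange_neg_one_eq_nil (by omega)]
    simp
  | succ m ih =>
    have hm' : m ≤ vs.length := by omega
    have hlt : m < vs.length := by omega
    have hcons : PySem.List.pyRange (((m : Nat) + 1 : Int) - 1) (-1) (-1) =
        ((m : Nat) : Int) :: PySem.List.pyRange (((m : Nat) : Int) - 1) (-1) (-1) := by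
      have := PySem.List.pyRange_neg_one_cons (a := ((m : Nat) + 1 : Int) - 1) (b := -1) (by omega)
      simpa using this
    push_cast
    push_cast at hcons
    rw [hcons, List.foldl_cons]
    have hget : PySem.List.pyGetD vs ((m : Nat) : Int) 0 = vs[m] := by
      rw [PySem.List.pyGetD_natCast, List.getD_eq_getElem vs 0 hlt]
    rw [ih hm']
    rw [List.take_add_one, List.getElem?_eq_getElem hlt]
    simp only [Option.toList_some]
    by_cases hv : v ∈ vs.take m
    · rw [if_pos hv, if_pos (by exact List.mem_append.2 (Or.inl hv))]
      rw [List.idxOf_append_of_mem hv]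
    · rw [if_neg hv]
      by_cases hvm : v = vs[m]
      · subst hvm
        rw [if_pos (List.mem_append_right _ (List.mem_singleton.2 rfl)), hget, PySem.Dict.get?_insert_self]
        rw [List.idxOf_append_of_notMem hv]
        have : (vs.take m).length = m := List.length_take_of_le hm'
        simp [this]
      · have hnm : v ∉ vs.take m ++ [vs[m]] := by
          intro hmem
          rcases List.mem_append.1 hmem with h1 | h1
          · exact hv h1
          · exact hvm (List.mem_singleton.1 h1)
        rw [hget, PySem.Dict.get?_insert_of_ne _ _ hvm, if_neg hnm]

-- rank in the dedup list + 1 = distinct count of the prefix ending at the first occurrence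
lemma rank_eq_prefix_count (vs : List Int) (v : Int) (hv : v ∈ vs) :
    ((PySem.Set.ofList vs).idxOf v) + 1 = (PySem.Set.ofList (vs.take (vs.idxOf v + 1))).length := by
  set i := vs.idxOf v with hi
  have hlt : i < vs.length := List.idxOf_lt_length_of_mem hv
  have htake : vs.take (i + 1) = vs.take i ++ [v] := by
    rw [List.take_add_one, List.getElem?_eq_getElem hlt]
    simp [hi]
  have hnotmem : v ∉ vs.take i := by
    intro hmem
    have h1 := List.idxOf_lt_length_of_mem hmem
    rw [List.length_take] at h1
    have h2 : vs.idxOf v = (vs.take i).idxOf v :=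
      Eq.symm (List.IsPrefix.idxOf_eq_of_mem (List.take_prefix i vs) hmem)
    omega
  have hsplit : vs = vs.take (i + 1) ++ vs.drop (i + 1) := (List.take_append_drop (i + 1) vs).symm
  have hD : PySem.Set.ofList vs =
      PySem.Set.ofList (vs.take (i + 1)) ++
        (PySem.Set.ofList (vs.drop (i + 1))).filter
          (fun y => !(PySem.Set.contains (PySem.Set.ofList (vs.take (i + 1))) y)) := by
    conv_lhs => rw [hsplit]
    rw [PySem.Set.ofList_append, PySem.Set.update_eq_append_filter]
  have hvnotmem : v ∉ PySem.Set.ofList (vs.take i) := by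
    simp [PySem.Set.mem_ofList, hnotmem]
  have htakeS : PySem.Set.ofList (vs.take (i + 1)) = PySem.Set.ofList (vs.take i) ++ [v] := by
    rw [htake, PySem.Set.ofList_append_singleton, PySem.Set.add_of_not_mem hvnotmem]
  rw [hD, htakeS]
  rw [List.append_assoc, List.idxOf_append_of_notMem hvnotmem]
  simp
-- ===== VERDICT (by name: the statement is the Claim_ definition above) =====
theorem renumber_py_spec : Claim_equal_renumber_py := by
  intro l _ hpre
  show renumber_py l = renumber_py_alt l
  rw [A_char l hpre]
  simp only [renumber_py_alt]
  apply List.map_congr_left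
  intro p hp
  have hv : p.2 ∈ l.map Prod.snd := List.mem_map.2 ⟨p, hp, rfl⟩
  set vs := l.map Prod.snd with hvs
  congr 1
  -- left side: the table lookup
  have hT := (table_char vs).2 p.2
  rw [if_pos hv] at hT
  have hTD : (vs.foldl stepB PySem.Dict.empty).getD p.2 0 =
      ((PySem.Set.ofList vs).idxOf p.2 : Int) + 1 := by
    rw [PySem.Dict.getD_eq_get?_getD, hT]; rfl
  rw [hTD]
  -- right side: first_pos lookup is the first index
  have hfp := fp_aux vs vs.length le_rfl PySem.Dict.empty p.2
  rw [List.take_length, if_pos hv] at hfp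
  have hfpD :
      (((PySem.List.pyRange ((vs.length : Int) - 1) (-1) (-1)).foldl
        (fun (d : PySem.Dict Int Int) i => d.insert (PySem.List.pyGetD vs i 0) i)
        PySem.Dict.empty).getD p.2 0) = ((vs.idxOf p.2 : Nat) : Int) := by
    rw [PySem.Dict.getD_eq_get?_getD, hfp]; rfl
  rw [hfpD]
  -- du lookup at the first index is the prefix distinct count
  rw [du_aux vs (PySem.Set.ofList []) []]
  rw [List.nil_append, PySem.List.pyGetD_natCast]
  have hidx : vs.idxOf p.2 < vs.length := List.idxOf_lt_length_of_mem hv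
  rw [PySem.List.getD_map_range _ _ _ _ hidx]
  have : PySem.Set.update (PySem.Set.ofList []) (vs.take (vs.idxOf p.2 + 1)) =
      PySem.Set.ofList (vs.take (vs.idxOf p.2 + 1)) := PySem.Set.update_nil_left _
  rw [this]
  rw [← rank_eq_prefix_count vs p.2 hv]
  push_cast
  ring
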